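-- pv_equiv track=rewrite | github.com/aliAljaffer/schoolwork | codingBatSolutions/lucky_sum.py | lucky_sum
-- ===== SOURCE A (Python) =====
-- def lucky_sum(a, b, c):
--   nums = [a,b,c]
--   sum = 0
--   try:
--     for i in range(nums.index(13)):
--       sum+=nums[i]
--     return sum
--   except:
--     return a + b + c
-- ===== SOURCE B (Python) =====
-- def lucky_sum(a, b, c):
--     if a == 13:
--         return 0
--     if b == 13:
--         return 0 + a
--     if c == 13:
--         return 0 + a + b
--     return a + b + c
-- ===== Notes on version B (the rewrite author's own statement) =====
-- stated objective: simpler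
-- what changed: Replaces the list/.index/try-except/loop with a flat chain of three positional comparisons and direct sums.
import Mathlib
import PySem

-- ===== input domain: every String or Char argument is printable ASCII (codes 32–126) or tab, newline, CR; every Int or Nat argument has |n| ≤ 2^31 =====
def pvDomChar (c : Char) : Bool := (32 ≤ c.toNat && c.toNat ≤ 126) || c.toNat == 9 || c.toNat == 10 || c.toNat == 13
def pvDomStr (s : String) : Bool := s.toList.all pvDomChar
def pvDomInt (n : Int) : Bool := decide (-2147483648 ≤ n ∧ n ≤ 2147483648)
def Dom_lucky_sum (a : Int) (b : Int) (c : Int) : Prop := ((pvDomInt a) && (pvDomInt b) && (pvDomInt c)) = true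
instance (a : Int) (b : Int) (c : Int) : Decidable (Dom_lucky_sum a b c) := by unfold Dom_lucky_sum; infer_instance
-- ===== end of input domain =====

-- ===== PORT A =====
-- Header: B replaces A's list/.index/try-except/loop with a flat chain of positional comparisons (objective: simpler).
-- Literal port of A: build [a,b,c], find index of 13 (none = ValueError, caught by except -> a+b+c),
-- else sum nums[i] for i in range(index); indices are in range, so pyGet?.getD 0 is exact here.
def lucky_sum (a : Int) (b : Int) (c : Int) : Int :=
  let nums : List Int := [a, b, c]
  match PySem.List.index? nums 13 with
  | none => a + b + c
  | some k =>
    (PySem.List.pyRange 0 (Int.ofNat k) 1).foldl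
      (fun s i => s + (PySem.List.pyGet? nums i).getD 0) 0

-- ===== PORT B =====
def lucky_sum_alt (a : Int) (b : Int) (c : Int) : Int :=
  if a = 13 then 0
  else if b = 13 then 0 + a
  else if c = 13 then 0 + a + b
  else a + b + c

-- ===== PRECONDITION & SPEC =====
def Spec_lucky_sum (a : Int) (b : Int) (c : Int) (out : Int) : Prop := out = lucky_sum_alt a b c
instance (a : Int) (b : Int) (c : Int) (out : Int) : Decidable (Spec_lucky_sum a b c out) := by unfold Spec_lucky_sum; infer_instance

-- ===== CLAIM (what is proved, stated in full; the proofs are below) =====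
def Claim_equal_lucky_sum : Prop := ∀ (a : Int) (b : Int) (c : Int), Dom_lucky_sum a b c → Spec_lucky_sum a b c (lucky_sum a b c)

-- ===== LEMMAS AND PROOFS =====

-- ===== VERDICT (by name: the statement is the Claim_ definition above) =====
theorem lucky_sum_spec : Claim_equal_lucky_sum := by
  intro a b c _
  unfold Spec_lucky_sum lucky_sum lucky_sum_alt
  by_cases ha : a = 13 <;> by_cases hb : b = 13 <;> by_cases hc : c = 13 <;>
    simp [PySem.List.index?, ha, hb, hc, List.idxOf?, List.findIdx?_cons,
          beq_iff_eq, PySem.List.pyRange, PySem.List.pyGet?, PySem.List.pyIdx?,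
          List.range_succ, List.foldl]
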